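-- pv_equiv track=rewrite | github.com/AsadiAhmad/Sudoku-Solver | BackTrack.py | checkList
-- ===== SOURCE A (Python) =====
-- def checkList(myList):
--     numList = [1,2,3,4,5,6,7,8,9]
--     for element in myList:
--         for num in numList:
--             if element == num:
--                 numList.remove(num)
--     if numList == []:
--         return True, numList
--     else:
--         return False, numList
-- ===== SOURCE B (Python) =====
-- def checkList(myList):
--     present = set(myList)
--     missing = [n for n in range(1, 10) if n not in present]
--     return (not missing, missing)
-- ===== Notes on version B (the rewrite author's own statement) =====
-- stated objective: idiomatic
-- what changed: Replaces A's nested scan of myList that removes hits from a shrinking numList with building a membership set of myList once and then filtering the fixed digits 1..9 for absentees (constant-factor win: one hash-set pass instead of an inner list scan per element).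
import Mathlib
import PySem

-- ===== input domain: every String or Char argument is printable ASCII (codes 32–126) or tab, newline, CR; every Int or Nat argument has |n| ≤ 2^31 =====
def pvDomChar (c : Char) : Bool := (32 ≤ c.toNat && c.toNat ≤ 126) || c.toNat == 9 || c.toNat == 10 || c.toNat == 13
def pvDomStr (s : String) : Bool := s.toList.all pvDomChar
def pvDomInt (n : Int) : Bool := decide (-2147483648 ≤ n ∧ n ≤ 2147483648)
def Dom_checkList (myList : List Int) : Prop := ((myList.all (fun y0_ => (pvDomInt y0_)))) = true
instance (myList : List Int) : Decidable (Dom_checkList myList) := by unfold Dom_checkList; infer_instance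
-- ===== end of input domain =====

-- B builds a membership set of myList once and filters the fixed digits 1..9 for absentees,
-- replacing A's nested scan that removes hits from a shrinking numList (objective: idiomatic).


-- ===== PORT A =====
-- Python's `for num in numList` over the list it mutates is index-based: the loop index
-- advances by one each step while `numList.remove(num)` shrinks the list.
def checkListInner (element : Int) (nl : List Int) (i : Nat) : List Int :=
  if h : i < nl.length then
    if element = nl[i] then
      match hr : PySem.List.remove? nl nl[i] with
      | some nl' => checkListInner element nl' (i + 1)
      | none => checkListInner element nl (i + 1)
    else checkListInner element nl (i + 1)
  else nl
termination_by nl.length - i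
decreasing_by
  · have hm : nl[i] ∈ nl := List.getElem_mem h
    rw [PySem.List.remove?_eq_some_erase _ _ hm] at hr
    have := List.length_erase_of_mem hm
    cases hr; omega
  · omega
  · omega

def checkList (myList : List Int) : Bool × List Int :=
  let numList := myList.foldl (fun nl element => checkListInner element nl 0) [1,2,3,4,5,6,7,8,9]
  if numList = [] then (true, numList) else (false, numList)

-- ===== PORT B =====
def checkList_alt (myList : List Int) : Bool × List Int :=
  let present : PySem.Set Int := PySem.Set.ofList myList
  let missing := (PySem.List.pyRange 1 10 1).filter (fun n => !(PySem.Set.contains present n))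
  (missing.isEmpty, missing)

-- ===== PRECONDITION & SPEC =====
def Spec_checkList (myList : List Int) (out : Bool × List Int) : Prop := out = checkList_alt myList
instance (myList : List Int) (out : Bool × List Int) : Decidable (Spec_checkList myList out) := by unfold Spec_checkList; infer_instance

-- ===== CLAIM (what is proved, stated in full; the proofs are below) =====
def Claim_equal_checkList : Prop := ∀ (myList : List Int), Dom_checkList myList → Spec_checkList myList (checkList myList)

-- ===== LEMMAS AND PROOFS =====

-- once `element` does not occur from index i on, the inner loop is the identity
lemma checkListInner_no_match (element : Int) (nl : List Int) (i : Nat)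
    (hnm : element ∉ nl.drop i) : checkListInner element nl i = nl := by
  revert hnm
  fun_induction checkListInner element nl i with
  | case1 nl i h hm nl' hr ih =>
      intro hnm
      exact absurd (by rw [List.drop_eq_getElem_cons h, ← hm]; exact List.mem_cons_self) hnm
  | case2 nl i h hm hr ih =>
      intro hnm
      exact absurd (by rw [List.drop_eq_getElem_cons h, ← hm]; exact List.mem_cons_self) hnm
  | case3 nl i h hm ih =>
      intro hnm
      exact ih (fun hx => hnm (by rw [List.drop_eq_getElem_cons h]; exact List.mem_cons_of_mem _ hx))
  | case4 nl i h => intro _; rfl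

-- on a duplicate-free list the inner loop filters `element` out of the unvisited suffix
lemma checkListInner_eq_filter (element : Int) (nl : List Int) (i : Nat) (hnd : nl.Nodup) :
    checkListInner element nl i = nl.take i ++ (nl.drop i).filter (fun x => x != element) := by
  revert hnd
  fun_induction checkListInner element nl i with
  | case1 nl i h hm nl' hr ih =>
      intro hnd
      rw [PySem.List.remove?_eq_some_erase _ _ (List.getElem_mem h)] at hr
      cases hr
      rw [← hm] at ih ⊢
      rw [checkListInner_no_match _ _ _
        (fun hx => hnd.not_mem_erase (List.mem_of_mem_drop hx))]
      have hsplit : nl.drop i = element :: nl.drop (i + 1) := by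
        rw [List.drop_eq_getElem_cons h, ← hm]
      have hne : element ∉ nl.drop (i + 1) := by
        have hsub := hnd.sublist (List.drop_sublist i nl)
        rw [hsplit] at hsub
        exact (List.nodup_cons.mp hsub).1
      have hnt : element ∉ nl.take i := by
        intro hx
        have hdisj := List.disjoint_of_nodup_append (by rw [List.take_append_drop i nl]; exact hnd)
        exact hdisj hx (by rw [hsplit]; exact List.mem_cons_self)
      calc nl.erase element
          = (nl.take i ++ nl.drop i).erase element := by rw [List.take_append_drop]
        _ = nl.take i ++ (nl.drop i).erase element := List.erase_append_right _ hnt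
        _ = nl.take i ++ nl.drop (i + 1) := by rw [hsplit, List.erase_cons_head]
        _ = nl.take i ++ (nl.drop i).filter (fun x => x != element) := by
            rw [hsplit, List.filter_cons]
            simp only [bne_self_eq_false, Bool.false_eq_true, reduceIte]
            rw [List.filter_eq_self.mpr (fun x hx => by
              simp only [bne_iff_ne, ne_eq]; exact fun he => hne (he ▸ hx))]
  | case2 nl i h hm hr ih =>
      intro hnd
      exact absurd hr (by
        rw [PySem.List.remove?_eq_some_erase _ _ (List.getElem_mem h)]; simp)
  | case3 nl i h hm ih =>
      intro hnd
      rw [ih hnd, List.take_succ_eq_append_getElem h,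
        List.drop_eq_getElem_cons h, List.filter_cons]
      have hb : (nl[i] != element) = true := by
        simp only [bne_iff_ne, ne_eq]; exact fun he => hm (he.symm ▸ rfl)
      rw [hb, if_pos rfl, List.append_assoc, List.cons_append, List.nil_append]
  | case4 nl i h =>
      intro _
      rw [List.drop_eq_nil_of_le (by omega), List.take_of_length_le (by omega)]
      simp

lemma foldl_inner_eq_filter (xs : List Int) (nl : List Int) (hnd : nl.Nodup) :
    xs.foldl (fun nl element => checkListInner element nl 0) nl
      = nl.filter (fun x => x ∉ xs) := by
  induction xs generalizing nl with
  | nil => simp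
  | cons x xs ih =>
      rw [List.foldl_cons]
      have hstep : checkListInner x nl 0 = nl.filter (fun y => y != x) := by
        rw [checkListInner_eq_filter x nl 0 hnd]; simp
      rw [hstep, ih _ (hnd.filter _), List.filter_filter]
      refine List.filter_congr (fun y _ => ?_)
      by_cases h1 : y = x <;> by_cases h2 : y ∈ xs <;> simp [h1, h2]

-- ===== VERDICT (by name: the statement is the Claim_ definition above) =====
theorem checkList_spec : Claim_equal_checkList := by
  intro myList _
  unfold Spec_checkList checkList checkList_alt
  have key : myList.foldl (fun nl element => checkListInner element nl 0)
        ([1,2,3,4,5,6,7,8,9] : List Int)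
      = (PySem.List.pyRange 1 10 1).filter
          (fun n => !(PySem.Set.contains (PySem.Set.ofList myList) n)) := by
    rw [foldl_inner_eq_filter _ _ (by decide)]
    rw [show PySem.List.pyRange 1 10 1 = ([1,2,3,4,5,6,7,8,9] : List Int) from by decide]
    refine List.filter_congr (fun n _ => ?_)
    simp [PySem.Set.contains, PySem.Set.mem_ofList]
  simp only [key]
  generalize (PySem.List.pyRange 1 10 1).filter
      (fun n => !(PySem.Set.contains (PySem.Set.ofList myList) n)) = m
  cases m with
  | nil => simp
  | cons a l => simp
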